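-- pv_equiv track=rewrite | github.com/Lifted-Truck/Tonality | mts/analysis/chord_analysis.py | _normalize_register
-- ===== SOURCE A (Python) =====
-- def _normalize_register(values: list[int]) -> list[int]:
--     if not values:
--         return []
--     ordered = sorted(values)
--     normalized = [ordered[0]]
--     for val in ordered[1:]:
--         nxt = val
--         while nxt <= normalized[-1]:
--             nxt += 12
--         normalized.append(nxt)
--     return normalized
-- ===== SOURCE B (Python) =====
-- def _normalize_register(values: list[int]) -> list[int]:
--     if not values:
--         return []
--     out = []
--     prev = None
--     for v in sorted(values):
--         if prev is not None and v <= prev: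
--             v += 12 * ((prev - v) // 12 + 1)
--         out.append(v)
--         prev = v
--     return out
-- ===== Notes on version B (the rewrite author's own statement) =====
-- stated objective: faster
-- what changed: The per-element 'while nxt <= last: nxt += 12' stepping loop is replaced by a single pass computing the required octave shift in closed form with one floor division per element.
import Mathlib
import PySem

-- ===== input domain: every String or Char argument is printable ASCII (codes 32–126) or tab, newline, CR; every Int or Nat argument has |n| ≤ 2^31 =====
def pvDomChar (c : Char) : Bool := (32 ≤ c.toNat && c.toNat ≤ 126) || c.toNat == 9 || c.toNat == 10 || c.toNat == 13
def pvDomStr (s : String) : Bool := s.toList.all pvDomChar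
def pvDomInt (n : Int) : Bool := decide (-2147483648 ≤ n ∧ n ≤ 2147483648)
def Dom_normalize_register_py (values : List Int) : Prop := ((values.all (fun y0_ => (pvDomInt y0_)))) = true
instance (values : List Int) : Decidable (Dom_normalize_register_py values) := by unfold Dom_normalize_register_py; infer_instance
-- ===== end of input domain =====

-- B replaces A's per-element 'while nxt <= last: nxt += 12' stepping loop by one
-- closed-form floor division per element (objective: faster, asymptotic).

-- ===== PORT A =====
-- A's inner 'while nxt <= normalized[-1]: nxt += 12' loop
def pyLiftA (prev : Int) (nxt : Int) : Int :=
  if nxt ≤ prev then pyLiftA prev (nxt + 12) else nxt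
termination_by (prev + 1 - nxt).toNat
decreasing_by omega

def normalize_register_py (values : List Int) : List Int :=
  if values = [] then []
  else
    match PySem.List.sorted values (fun x => x) false with
    | [] => []   -- unreachable: sorted of a nonempty list is nonempty
    | h :: t =>
        t.foldl (fun normalized val =>
          normalized ++ [pyLiftA (PySem.List.pyGetD normalized (-1) 0) val]) [h]

-- ===== PORT B =====
def normalize_register_py_alt (values : List Int) : List Int :=
  if values = [] then []
  else
    ((PySem.List.sorted values (fun x => x) false).foldl
      (fun (st : List Int × Option Int) v =>
        let v' := match st.2 with
          | some p => if v ≤ p then v + 12 * (PySem.Int.floordiv (p - v) 12 + 1) else v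
          | none => v
        (st.1 ++ [v'], some v')) ([], none)).1

-- ===== PRECONDITION & SPEC =====
def Spec_normalize_register_py (values : List Int) (out : List Int) : Prop := out = normalize_register_py_alt values
instance (values : List Int) (out : List Int) : Decidable (Spec_normalize_register_py values out) := by unfold Spec_normalize_register_py; infer_instance

-- ===== CLAIM (what is proved, stated in full; the proofs are below) =====
def Claim_equal_normalize_register_py : Prop := ∀ (values : List Int), Dom_normalize_register_py values → Spec_normalize_register_py values (normalize_register_py values)

-- ===== LEMMAS AND PROOFS =====

-- A's stepping loop computes B's closed form.
theorem pyLiftA_eq (prev v : Int) :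
    pyLiftA prev v = if v ≤ prev then v + 12 * (PySem.Int.floordiv (prev - v) 12 + 1) else v := by
  fun_induction pyLiftA prev v with
  | case1 v hle ih =>
      rw [ih]
      rw [PySem.Int.floordiv_eq_ediv_of_pos (a := prev - v) (by omega),
        PySem.Int.floordiv_eq_ediv_of_pos (a := prev - (v + 12)) (by omega)]
      split_ifs <;> omega
  | case2 v hle =>
      rw [PySem.Int.floordiv_eq_ediv_of_pos (by omega)]
      split_ifs <;> omega

-- The two folds agree: B's state is (A's list, its last element).
theorem fold_agree (t : List Int) (L : List Int) (p : Int)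
    (hp : PySem.List.pyGetD L (-1) 0 = p) :
    t.foldl (fun normalized val =>
        normalized ++ [pyLiftA (PySem.List.pyGetD normalized (-1) 0) val]) L
    = (t.foldl (fun (st : List Int × Option Int) v =>
        let v' := match st.2 with
          | some q => if v ≤ q then v + 12 * (PySem.Int.floordiv (q - v) 12 + 1) else v
          | none => v
        (st.1 ++ [v'], some v')) (L, some p)).1 := by
  induction t generalizing L p with
  | nil => rfl
  | cons v t ih =>
      have hstep : pyLiftA (PySem.List.pyGetD L (-1) 0) v
          = (if v ≤ p then v + 12 * (PySem.Int.floordiv (p - v) 12 + 1) else v) := by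
        rw [hp, pyLiftA_eq]
      rw [List.foldl_cons, List.foldl_cons, hstep]
      exact ih _ _ (PySem.List.pyGetD_neg_one_append_singleton _ _ _)

-- ===== VERDICT (by name: the statement is the Claim_ definition above) =====
theorem normalize_register_py_spec : Claim_equal_normalize_register_py := by
  intro values _
  unfold Spec_normalize_register_py normalize_register_py normalize_register_py_alt
  by_cases hne : values = []
  · simp [hne]
  · simp only [hne, if_false]
    cases h : PySem.List.sorted values (fun x => x) false with
    | nil => rfl
    | cons a t =>
        simp only [List.foldl_cons]
        exact fold_agree t [a] a rfl
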